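-- pv_equiv track=rewrite | github.com/jcolinpatrick/kryptos | scripts/blitz_t_final.py | keyword_columnar_perm
-- ===== SOURCE A (Python) =====
-- import sys, json, os, math, itertools
--
-- AZ  = "ABCDEFGHIJKLMNOPQRSTUVWXYZ"
--
-- def is_valid_perm(perm, n=97):
--     return len(perm) == n and set(perm) == set(range(n))
--
-- def keyword_columnar_perm(keyword, n=97):
--     """Standard keyed columnar transposition using keyword for column ordering."""
--     W = len(keyword)
--     if W == 0 or W > n: return None
--     # Assign ranks to keyword letters (stable sort)
--     ranks = sorted(range(W), key=lambda i: (AZ.find(keyword[i]), i))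
--     col_order = [0] * W
--     for rank, col_idx in enumerate(ranks):
--         col_order[rank] = col_idx
--     # Wait, col_order should be: col_order[rank] = which column to read at rank-th position
--     # More precisely: read columns in order of their rank in the keyword
--     # col_order = argsort(keyword_ranks)
--     col_order = sorted(range(W), key=lambda c: (AZ.find(keyword[c]) if keyword[c] in AZ else 99, c))
--     n_rows = math.ceil(n / W)
--     perm = []
--     for c in col_order:
--         for r_idx in range(n_rows):
--             idx = r_idx * W + c
--             if idx < n: perm.append(idx)
--     return perm if is_valid_perm(perm, n) else None
-- ===== SOURCE B (Python) =====
-- AZ = "ABCDEFGHIJKLMNOPQRSTUVWXYZ"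
--
-- def keyword_columnar_perm(keyword, n=97):
--     """Keyed columnar transposition permutation: one stable sort of all positions."""
--     W = len(keyword)
--     if W == 0 or W > n:
--         return None
--     def key(i):
--         c = i % W
--         ch = keyword[c]
--         return (AZ.find(ch) if ch in AZ else 99, c, i)
--     return sorted(range(n), key=key)
-- ===== Notes on version B (the rewrite author's own statement) =====
-- stated objective: simpler
-- what changed: Drops the dead ranks/col_order write pass, the sorted column list, the nested column-by-row loops and the final is_valid_perm gate, replacing the whole body with a single stable sort of all n positions under the composite key (column rank, column index, position).
import Mathlib
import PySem

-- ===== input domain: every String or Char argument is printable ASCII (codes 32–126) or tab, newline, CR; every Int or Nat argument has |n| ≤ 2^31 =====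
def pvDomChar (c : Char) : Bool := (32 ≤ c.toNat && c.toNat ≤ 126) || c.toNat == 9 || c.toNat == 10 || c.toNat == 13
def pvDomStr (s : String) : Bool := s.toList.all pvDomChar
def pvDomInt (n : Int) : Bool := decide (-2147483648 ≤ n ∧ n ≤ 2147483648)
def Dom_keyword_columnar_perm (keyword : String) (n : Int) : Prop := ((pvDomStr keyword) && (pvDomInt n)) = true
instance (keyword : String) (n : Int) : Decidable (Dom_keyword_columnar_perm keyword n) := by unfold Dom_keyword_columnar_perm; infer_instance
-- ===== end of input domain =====

-- B replaces A's dead rank pass, sorted column list and nested column/row loops (and the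
-- always-true is_valid_perm gate) by one stable sort of all n positions under the key
-- (column rank, column index, position); same value everywhere, not claimed faster.


-- ===== PORT A =====
-- AZ = "ABCDEFGHIJKLMNOPQRSTUVWXYZ" (as a code-point list; string ops are ported on List Char)
def pvAZ : List Char := "ABCDEFGHIJKLMNOPQRSTUVWXYZ".toList

-- keyword[c]; every use below has 0 ≤ c < len(keyword), so the default is never read
def pvCharAt (kw : List Char) (c : Int) : Char := PySem.List.pyGetD kw c 'A'

-- AZ.find(keyword[c]) if keyword[c] in AZ else 99   (keyword[c] is a 1-char string in Python)
def pvColKey (kw : List Char) (c : Int) : Int :=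
  if PySem.Chars.isIn [pvCharAt kw c] pvAZ then PySem.Chars.find pvAZ [pvCharAt kw c] else 99

def is_valid_perm (perm : List Int) (n : Int) : Bool :=
  PySem.List.len perm == n &&
  PySem.Set.equal (PySem.Set.ofList perm) (PySem.Set.ofList (PySem.List.pyRange 0 n 1))

def keyword_columnar_perm (keyword : String) (n : Int) : Option (List Int) :=
  let kw := keyword.toList
  let W := PySem.List.len kw
  if W = 0 ∨ W > n then none
  else
    -- ranks / first col_order / write loop: dead code in A, transliterated all the same
    let ranks := PySem.List.sorted2 (PySem.List.pyRange 0 W 1)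
      (fun i => PySem.Chars.find pvAZ [pvCharAt kw i]) (fun i => i)
    let col_order := PySem.List.pyRepeat [(0 : Int)] W
    let _col_order := (PySem.List.enumerate ranks).foldl
      (fun co p => PySem.List.pySetD co p.1 p.2) col_order
    let col_order := PySem.List.sorted2 (PySem.List.pyRange 0 W 1)
      (fun c => pvColKey kw c) (fun c => c)
    -- math.ceil(n/W) ported as -((-n)//W): exact on the stated domain (|n| ≤ 2^31 < 2^53,
    -- so Python's float quotient n/W cannot round across an integer; float ceil = exact ceil)
    let n_rows := -(PySem.Int.floordiv (-n) W)
    let perm := col_order.foldl (fun perm c =>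
      (PySem.List.pyRange 0 n_rows 1).foldl (fun perm r =>
        let idx := r * W + c
        if idx < n then perm ++ [idx] else perm) perm) []
    if is_valid_perm perm n then some perm else none

-- ===== PORT B =====
-- Source B sorts range(n) by the tuple key (colkey, c, i); PySem.List.sorted takes a single
-- linearly-ordered key, so the tuple is ported as the packed integer (colkey*W + c)*n + i,
-- order-isomorphic to the tuple on the sorted domain (0 ≤ c < W ≤ n, 0 ≤ i < n).
def keyword_columnar_perm_alt (keyword : String) (n : Int) : Option (List Int) :=
  let kw := keyword.toList
  let W := PySem.List.len kw
  if W = 0 ∨ W > n then none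
  else
    some (PySem.List.sorted (PySem.List.pyRange 0 n 1)
      (fun i => (pvColKey kw (PySem.Int.mod i W) * W + PySem.Int.mod i W) * n + i))

-- ===== PRECONDITION & SPEC =====
def Spec_keyword_columnar_perm (keyword : String) (n : Int) (out : Option (List Int)) : Prop := out = keyword_columnar_perm_alt keyword n
instance (keyword : String) (n : Int) (out : Option (List Int)) : Decidable (Spec_keyword_columnar_perm keyword n out) := by unfold Spec_keyword_columnar_perm; infer_instance

-- ===== CLAIM (what is proved, stated in full; the proofs are below) =====
def Claim_equal_keyword_columnar_perm : Prop := ∀ (keyword : String) (n : Int), Dom_keyword_columnar_perm keyword n → Spec_keyword_columnar_perm keyword n (keyword_columnar_perm keyword n)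

-- ===== LEMMAS AND PROOFS =====

-- packing two lexicographic components into one integer: order characterisation
lemma pvPackLt (u v a b W : Int) (ha : 0 ≤ a) (haW : a < W) (hb : 0 ≤ b) (hbW : b < W) :
    u * W + a < v * W + b ↔ (u < v ∨ (u = v ∧ a < b)) := by
  constructor
  · intro h
    rcases lt_trichotomy u v with hu | hu | hu
    · exact Or.inl hu
    · exact Or.inr ⟨hu, by subst hu; omega⟩
    · exfalso; nlinarith
  · rintro (hu | ⟨hu, hab⟩)
    · nlinarith
    · subst hu; omega

-- insertBy only looks at 'before' on the inserted element vs members of the list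
lemma pvInsertBy_congr {α : Type} (b1 b2 : α → α → Bool) (x : α) (ys : List α)
    (h : ∀ y ∈ ys, b1 x y = b2 x y) :
    PySem.List.insertBy b1 x ys = PySem.List.insertBy b2 x ys := by
  induction ys with
  | nil => rfl
  | cons y ys ih =>
    simp only [PySem.List.insertBy]
    rw [h y (by simp)]
    split
    · rfl
    · rw [ih (fun z hz => h z (by simp [hz]))]

lemma pvFoldl_insertBy_congr {α : Type} (b1 b2 : α → α → Bool) (S : List α) :
    ∀ (xs acc : List α), (∀ x ∈ xs, x ∈ S) → (∀ x ∈ acc, x ∈ S) →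
    (∀ a ∈ S, ∀ b ∈ S, b1 a b = b2 a b) →
    xs.foldl (fun acc x => PySem.List.insertBy b1 x acc) acc
      = xs.foldl (fun acc x => PySem.List.insertBy b2 x acc) acc := by
  intro xs
  induction xs with
  | nil => intros; rfl
  | cons x xs ih =>
    intro acc hxs hacc h
    simp only [List.foldl_cons]
    rw [pvInsertBy_congr b1 b2 x acc
      (fun y hy => h x (hxs x (by simp)) y (hacc y hy))]
    exact ih _ (fun z hz => hxs z (by simp [hz]))
      (fun z hz => by
        rcases (PySem.List.mem_insertBy b2 x z acc).1 hz with rfl | hz'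
        · exact hxs z (by simp)
        · exact hacc z hz') h

-- sorted2 with keys (k1, k2) equals sorted with a single key K when K orders pairs of
-- members of xs exactly lexicographically
lemma pvSorted2_eq_sorted (xs : List Int) (k1 k2 K : Int → Int)
    (h : ∀ a ∈ xs, ∀ b ∈ xs,
      (decide (k1 a < k1 b) || (!decide (k1 b < k1 a) && decide (k2 a < k2 b)))
        = decide (K a < K b)) :
    PySem.List.sorted2 xs k1 k2 = PySem.List.sorted xs K := by
  rw [PySem.List.sorted_eq_foldl_insertBy]
  exact pvFoldl_insertBy_congr _ _ xs xs [] (fun _ hx => hx) (by simp) h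

-- the column block A appends for column c
def pvBlk (W n n_rows c : Int) : List Int :=
  ((PySem.List.pyRange 0 n_rows 1).filter (fun r => decide (r * W + c < n))).map
    (fun r => r * W + c)

lemma pvMem_blk (W n n_rows c x : Int) (hW : 0 < W) (hc : 0 ≤ c) (hcW : c < W)
    (hrows : (n_rows - 1) * W < n ∧ n ≤ n_rows * W) :
    x ∈ pvBlk W n n_rows c ↔ 0 ≤ x ∧ x < n ∧ x % W = c := by
  simp only [pvBlk, List.mem_map, List.mem_filter, PySem.List.mem_pyRange_one,
    decide_eq_true_eq]
  constructor
  · rintro ⟨r, ⟨⟨hr0, _⟩, hlt⟩, rfl⟩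
    refine ⟨by nlinarith, hlt, ?_⟩
    rw [show r * W + c = c + W * r by ring, Int.add_mul_emod_self_left,
      Int.emod_eq_of_lt hc hcW]
  · rintro ⟨hx0, hxn, hmod⟩
    have hdm := Int.mul_ediv_add_emod x W
    refine ⟨x / W, ⟨⟨Int.ediv_nonneg hx0 hW.le, ?_⟩, by nlinarith⟩, by nlinarith⟩
    have hlt : x / W * W < n_rows * W := by nlinarith
    exact lt_of_mul_lt_mul_right hlt hW.le

lemma pvPairwise_blk (W n n_rows c : Int) (hW : 0 < W) :
    (pvBlk W n n_rows c).Pairwise (· < ·) := by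
  apply List.Pairwise.map
  · intro r r' (hrr : r < r')
    nlinarith
  · exact (PySem.List.pairwise_lt_pyRange_one 0 n_rows).filter _

-- ===== VERDICT proof =====
theorem keyword_columnar_perm_spec : Claim_equal_keyword_columnar_perm := by
  intro keyword n _hdom
  unfold Spec_keyword_columnar_perm keyword_columnar_perm keyword_columnar_perm_alt
  set kw := keyword.toList with hkw
  simp only [PySem.List.len_eq]
  by_cases hg : (kw.length : Int) = 0 ∨ (kw.length : Int) > n
  · rw [if_pos hg, if_pos hg]
  · rw [if_neg hg, if_neg hg]
    have hW0 : (kw.length : Int) ≠ 0 := fun h => hg (Or.inl h)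
    have hWn : (kw.length : Int) ≤ n := le_of_not_gt (fun h => hg (Or.inr h))
    set W : Int := (kw.length : Int) with hWdef
    have hWpos : 0 < W := by simp only [hWdef]; omega
    have hnpos : 0 < n := lt_of_lt_of_le hWpos hWn
    set n_rows : Int := -(PySem.Int.floordiv (-n) W) with hnr
    have hrows : (n_rows - 1) * W < n ∧ n ≤ n_rows * W := by
      have := (PySem.Int.neg_floordiv_neg_eq_iff_of_pos (a := n) (b := W) (q := n_rows)
        hWpos).1 hnr.symm
      exact this
    set Kc : Int → Int := fun c => pvColKey kw c * W + c with hKc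
    set K : Int → Int := fun i =>
      (pvColKey kw (PySem.Int.mod i W) * W + PySem.Int.mod i W) * n + i with hK
    -- the second sorted2 in A is sorted by the packed column key Kc
    have hco : PySem.List.sorted2 (PySem.List.pyRange 0 W 1)
        (fun c => pvColKey kw c) (fun c => c)
        = PySem.List.sorted (PySem.List.pyRange 0 W 1) Kc := by
      apply pvSorted2_eq_sorted
      intro a ha b hb
      rw [PySem.List.mem_pyRange_one] at ha hb
      have h1 := pvPackLt (pvColKey kw a) (pvColKey kw b) a b W ha.1 ha.2 hb.1 hb.2
      have h2 := pvPackLt (pvColKey kw b) (pvColKey kw a) b a W hb.1 hb.2 ha.1 ha.2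
      simp only [hKc]
      rcases lt_trichotomy (pvColKey kw a) (pvColKey kw b) with hlt | heq | hgt
      · simp [hlt, h1.2 (Or.inl hlt)]
      · by_cases hab : a < b <;> simp_all
      · have h3 : ¬ (pvColKey kw a * W + a < pvColKey kw b * W + b) := by
          rw [h1]; omega
        simp_all
    set col_order : List Int := PySem.List.sorted (PySem.List.pyRange 0 W 1) Kc
      with hcodef
    -- A's nested loops produce the flatMap of column blocks
    have hP : col_order.foldl (fun perm c =>
        (PySem.List.pyRange 0 n_rows 1).foldl (fun perm r =>
          if r * W + c < n then perm ++ [r * W + c] else perm) perm) []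
        = col_order.flatMap (pvBlk W n n_rows) := by
      rw [PySem.List.foldl_congr_mem col_order _
        (fun acc c => acc ++ pvBlk W n n_rows c) []
        (fun acc c _ => PySem.List.foldl_append_ite (fun r => r * W + c < n)
            (fun r => r * W + c) _ _)]
      rw [PySem.List.foldl_append_eq_flatMap]
      simp
    set P : List Int := col_order.flatMap (pvBlk W n n_rows) with hPdef
    -- membership facts for col_order
    have hco_mem : ∀ c ∈ col_order, 0 ≤ c ∧ c < W := by
      intro c hc
      rw [hcodef, PySem.List.mem_sorted, PySem.List.mem_pyRange_one] at hc
      exact hc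
    have hco_nodup : col_order.Nodup :=
      ((PySem.List.sorted_perm _ _ _).nodup_iff).2 (PySem.List.nodup_pyRange_one 0 W)
    have hco_pw : col_order.Pairwise (fun a b => Kc a < Kc b) := by
      have h1 := PySem.List.sorted_pairwise (PySem.List.pyRange 0 W 1) Kc
      rw [← hcodef] at h1
      have h2 := h1.and hco_nodup
      refine h2.imp_of_mem ?_
      intro a b ha hb ⟨hle, hne⟩
      rcases lt_or_eq_of_le hle with h | h
      · exact h
      · exfalso
        obtain ⟨ha0, haW⟩ := hco_mem a ha
        obtain ⟨hb0, hbW⟩ := hco_mem b hb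
        have h1 : ¬ (pvColKey kw a < pvColKey kw b ∨
            (pvColKey kw a = pvColKey kw b ∧ a < b)) := fun hc =>
          absurd ((pvPackLt (pvColKey kw a) (pvColKey kw b) a b W ha0 haW hb0 hbW).2 hc)
            (by simp only [hKc] at h; omega)
        have h2 : ¬ (pvColKey kw b < pvColKey kw a ∨
            (pvColKey kw b = pvColKey kw a ∧ b < a)) := fun hc =>
          absurd ((pvPackLt (pvColKey kw b) (pvColKey kw a) b a W hb0 hbW ha0 haW).2 hc)
            (by simp only [hKc] at h; omega)
        exact hne (by omega)
    -- K on a member of a block with column c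
    have hKval : ∀ c x, 0 ≤ c → c < W → 0 ≤ x → x % W = c →
        K x = Kc c * n + x := by
      intro c x hc hcW hx hmod
      simp only [hK, hKc, PySem.Int.mod_eq_emod_of_pos hWpos, hmod]
    -- P is pairwise strictly increasing under K
    have hPpw : P.Pairwise (fun a b => K a < K b) := by
      rw [hPdef, List.pairwise_flatMap]
      constructor
      · intro c hc
        obtain ⟨hc0, hcW⟩ := hco_mem c hc
        refine (pvPairwise_blk W n n_rows c hWpos).imp_of_mem ?_
        intro x y hx hy hxy
        obtain ⟨hx0, hxn, hxm⟩ := (pvMem_blk W n n_rows c x hWpos hc0 hcW hrows).1 hx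
        obtain ⟨hy0, hyn, hym⟩ := (pvMem_blk W n n_rows c y hWpos hc0 hcW hrows).1 hy
        rw [hKval c x hc0 hcW hx0 hxm, hKval c y hc0 hcW hy0 hym]
        omega
      · refine hco_pw.imp_of_mem ?_
        intro c c' hc hc' hlt x hx y hy
        obtain ⟨hc0, hcW⟩ := hco_mem c hc
        obtain ⟨hc0', hcW'⟩ := hco_mem c' hc'
        obtain ⟨hx0, hxn, hxm⟩ := (pvMem_blk W n n_rows c x hWpos hc0 hcW hrows).1 hx
        obtain ⟨hy0, hyn, hym⟩ := (pvMem_blk W n n_rows c' y hWpos hc0' hcW' hrows).1 hy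
        rw [hKval c x hc0 hcW hx0 hxm, hKval c' y hc0' hcW' hy0 hym]
        exact (pvPackLt (Kc c) (Kc c') x y n hx0 hxn hy0 hyn).2 (Or.inl hlt)
    have hPnodup : P.Nodup := by
      refine hPpw.imp ?_
      intro a b hab
      rintro rfl
      exact lt_irrefl _ hab
    have hPmem : ∀ x, x ∈ P ↔ (0 ≤ x ∧ x < n) := by
      intro x
      rw [hPdef, List.mem_flatMap]
      constructor
      · rintro ⟨c, hc, hx⟩
        obtain ⟨hc0, hcW⟩ := hco_mem c hc
        obtain ⟨hx0, hxn, _⟩ := (pvMem_blk W n n_rows c x hWpos hc0 hcW hrows).1 hx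
        exact ⟨hx0, hxn⟩
      · rintro ⟨hx0, hxn⟩
        refine ⟨x % W, ?_, ?_⟩
        · rw [hcodef, PySem.List.mem_sorted, PySem.List.mem_pyRange_one]
          exact ⟨Int.emod_nonneg x (by omega), Int.emod_lt_of_pos x hWpos⟩
        · exact (pvMem_blk W n n_rows (x % W) x hWpos
            (Int.emod_nonneg x (by omega)) (Int.emod_lt_of_pos x hWpos) hrows).2
            ⟨hx0, hxn, rfl⟩
    have hPperm : P.Perm (PySem.List.pyRange 0 n 1) := by
      rw [List.perm_ext_iff_of_nodup hPnodup (PySem.List.nodup_pyRange_one 0 n)]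
      intro x
      rw [hPmem, PySem.List.mem_pyRange_one]
    -- B's sort therefore returns exactly P
    have hB : PySem.List.sorted (PySem.List.pyRange 0 n 1) K = P :=
      PySem.List.sorted_eq_of_perm_of_pairwise_lt _ _ K hPperm hPpw
    -- and the is_valid_perm gate is true
    have hvalid : is_valid_perm P n = true := by
      unfold is_valid_perm
      rw [Bool.and_eq_true]
      constructor
      · rw [beq_iff_eq, PySem.List.len_eq, hPperm.length_eq,
          PySem.List.length_pyRange_one]
        omega
      · rw [PySem.Set.equal_iff]
        intro x
        rw [PySem.Set.mem_ofList, PySem.Set.mem_ofList]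
        exact hPperm.mem_iff
    rw [hco, hP, hvalid]
    simp only [if_true]
    rw [hB]
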